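-- pv_equiv track=rewrite | github.com/sajedjalil/Data-Science-Pipeline-Detector | dataset/abstraction-and-reasoning-challenge/Colin Hagemeyer/kernel50619fbf30.py | nth_ordered
-- ===== SOURCE A (Python) =====
-- def nth_ordered(lst, n=0, use_max=True):
--     if None in lst:
--         return None
--     ordered_list = list(sorted(lst, reverse=True))
--     # Filter out repeats
--     ordered_list = [element for i, element in enumerate(ordered_list) if i == 0 or element != ordered_list[i - 1]]
--     if len(ordered_list) > n:
--         return ordered_list[n] if use_max else ordered_list[-1 - n]
--     else:
--         return None
-- ===== SOURCE B (Python) =====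
-- def nth_ordered(lst, n=0, use_max=True):
--     if None in lst:
--         return None
--     prev = None
--     have_prev = False
--     for _ in range(n + 1):
--         best = None
--         for x in lst:
--             if have_prev and (x >= prev if use_max else x <= prev):
--                 continue
--             if best is None or (x > best if use_max else x < best):
--                 best = x
--         if best is None:
--             return None
--         prev = best
--         have_prev = True
--     return prev
-- ===== Notes on version B (the rewrite author's own statement) =====
-- stated objective: alternative
-- what changed: Replaces sort-then-adjacent-dedup-then-index by repeated selection: scan the list n+1 times, each pass picking the next distinct extreme strictly beyond the previously selected one, with no sorting and no materialised deduplicated list.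
-- outside the precondition, e.g. on nth_ordered([3, 1], -1, True): A returns 1, B returns None; on nth_ordered([3, 1], -3, True): A raises IndexError, B returns None
import Mathlib
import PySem

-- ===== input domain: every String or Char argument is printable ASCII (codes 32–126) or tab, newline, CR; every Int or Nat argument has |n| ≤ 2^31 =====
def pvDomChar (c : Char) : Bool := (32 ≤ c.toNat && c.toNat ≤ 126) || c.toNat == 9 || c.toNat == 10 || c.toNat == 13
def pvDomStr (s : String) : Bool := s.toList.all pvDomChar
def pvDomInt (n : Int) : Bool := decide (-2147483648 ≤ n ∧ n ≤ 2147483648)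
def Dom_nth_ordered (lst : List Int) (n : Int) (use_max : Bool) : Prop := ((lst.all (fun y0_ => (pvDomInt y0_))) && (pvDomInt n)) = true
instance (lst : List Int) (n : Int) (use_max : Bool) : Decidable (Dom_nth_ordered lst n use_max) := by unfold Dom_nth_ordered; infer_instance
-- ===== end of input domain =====

-- B replaces A's sort-then-adjacent-dedup-then-index by repeated selection of successive distinct
-- extremes (objective: alternative algorithm; no speed claim).

-- ===== PORT A =====
-- 'if None in lst: return None' cannot fire for a List Int (no element is None); ported as a no-op.
def nth_ordered (lst : List Int) (n : Int) (use_max : Bool) : Option Int :=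
  let ordered := PySem.List.sorted lst (fun x => x) true
  let ordered2 := ((PySem.List.enumerate ordered).filter
      (fun ix => ix.1 == 0 || !(PySem.List.pyGet? ordered (ix.1 - 1) == some ix.2))).map (fun ix => ix.2)
  if (ordered2.length : Int) > n then
    if use_max then PySem.List.pyGet? ordered2 n else PySem.List.pyGet? ordered2 (-1 - n)
  else none

-- ===== PORT B =====
-- body of B's inner 'for x in lst' scan: skip x unless strictly beyond prev, else keep the extreme
def selStep (use_max : Bool) (prev : Option Int) (best : Option Int) (x : Int) : Option Int :=
  if (match prev with
      | some p => if use_max then decide (p ≤ x) else decide (x ≤ p)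
      | none => false) then best
  else
    match best with
    | none => some x
    | some b => if (if use_max then decide (b < x) else decide (x < b)) then some x else best

-- one pass over lst: the next distinct extreme strictly beyond prev, none if the pool is exhausted
def selectNext (lst : List Int) (prev : Option Int) (use_max : Bool) : Option Int :=
  lst.foldl (selStep use_max prev) none

-- B's outer 'for _ in range(n+1)' loop, with the early 'return None'
def selLoop (lst : List Int) (use_max : Bool) : Nat → Option Int → Option Int
  | 0, prev => prev
  | k+1, prev =>
    match selectNext lst prev use_max with
    | none => none
    | some b => selLoop lst use_max k (some b)

def nth_ordered_alt (lst : List Int) (n : Int) (use_max : Bool) : Option Int :=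
  selLoop lst use_max (n + 1).toNat none

-- ===== PRECONDITION & SPEC =====
-- Pre_ excludes negative n, where A indexes with a negative rank: it raises IndexError once the
-- rank exceeds the distinct count and otherwise returns a value by Python's negative-index
-- wraparound, a corner no caller of an nth-rank function would rely on; B returns None there.
def Pre_nth_ordered (lst : List Int) (n : Int) (use_max : Bool) : Prop := 0 ≤ n
instance (lst : List Int) (n : Int) (use_max : Bool) : Decidable (Pre_nth_ordered lst n use_max) := by unfold Pre_nth_ordered; infer_instance
def pvWitness_nth_ordered : List Int × Int × Bool := ([3, 1, 2, 1], 1, true)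

def Spec_nth_ordered (lst : List Int) (n : Int) (use_max : Bool) (out : Option Int) : Prop := out = nth_ordered_alt lst n use_max
instance (lst : List Int) (n : Int) (use_max : Bool) (out : Option Int) : Decidable (Spec_nth_ordered lst n use_max out) := by unfold Spec_nth_ordered; infer_instance

-- ===== CLAIM (what is proved, stated in full; the proofs are below) =====
def Claim_equal_nth_ordered : Prop := ∀ (lst : List Int) (n : Int) (use_max : Bool), Dom_nth_ordered lst n use_max → Pre_nth_ordered lst n use_max → Spec_nth_ordered lst n use_max (nth_ordered lst n use_max)

-- ===== LEMMAS AND PROOFS =====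

def ddAux : Int → List Int → List Int
  | _, [] => []
  | p, y :: ys => if y = p then ddAux y ys else y :: ddAux y ys

def dd : List Int → List Int
  | [] => []
  | x :: xs => x :: ddAux x xs

theorem ddAux_props : ∀ (ys : List Int) (p : Int), ys.Pairwise (· ≥ ·) → (∀ y ∈ ys, y ≤ p) →
    (ddAux p ys).Pairwise (· > ·) ∧ (∀ z, z ∈ ddAux p ys ↔ z ∈ ys ∧ z < p) := by
  intro ys
  induction ys with
  | nil => intro p _ _; simp [ddAux]
  | cons y ys ih =>
    intro p hpw hle
    rcases List.pairwise_cons.mp hpw with ⟨hy, hpw'⟩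
    have hyp : y ≤ p := hle y (List.mem_cons_self ..)
    have ihy := ih y hpw' hy
    by_cases hyq : y = p
    · subst hyq
      simp only [ddAux, if_true]
      refine ⟨ihy.1, fun z => ?_⟩
      rw [ihy.2 z, List.mem_cons]
      constructor
      · rintro ⟨hz, hlt⟩; exact ⟨Or.inr hz, hlt⟩
      · rintro ⟨hz | hz, hlt⟩; · omega
        exact ⟨hz, hlt⟩
    · have hylt : y < p := lt_of_le_of_ne hyp hyq
      simp only [ddAux, if_neg hyq]
      constructor
      · refine List.pairwise_cons.mpr ⟨fun z hz => ?_, ihy.1⟩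
        exact ((ihy.2 z).mp hz).2
      · intro z
        rw [List.mem_cons, ihy.2 z, List.mem_cons]
        constructor
        · rintro (rfl | ⟨hz, hlt⟩)
          · exact ⟨Or.inl rfl, hylt⟩
          · exact ⟨Or.inr hz, by omega⟩
        · rintro ⟨rfl | hz, hlt⟩
          · exact Or.inl rfl
          · rcases lt_or_eq_of_le (hy z hz) with h | h
            · exact Or.inr ⟨hz, h⟩
            · exact Or.inl h

theorem dd_pairwise {o : List Int} (h : o.Pairwise (· ≥ ·)) : (dd o).Pairwise (· > ·) := by
  cases o with
  | nil => simp [dd]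
  | cons x xs =>
    rcases List.pairwise_cons.mp h with ⟨hx, h'⟩
    have := ddAux_props xs x h' hx
    exact List.pairwise_cons.mpr ⟨fun z hz => ((this.2 z).mp hz).2, this.1⟩

theorem dd_mem {o : List Int} (h : o.Pairwise (· ≥ ·)) : ∀ z, z ∈ dd o ↔ z ∈ o := by
  cases o with
  | nil => intro z; simp [dd]
  | cons x xs =>
    rcases List.pairwise_cons.mp h with ⟨hx, h'⟩
    have hp := ddAux_props xs x h' hx
    intro z
    simp only [dd, List.mem_cons, hp.2 z]
    constructor
    · rintro (rfl | ⟨hz, _⟩)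
      · exact Or.inl rfl
      · exact Or.inr hz
    · rintro (rfl | hz)
      · exact Or.inl rfl
      · rcases lt_or_eq_of_le (hx z hz) with hlt | heq
        · exact Or.inr ⟨hz, hlt⟩
        · exact Or.inl heq

def maxStep (best : Option Int) (x : Int) : Option Int :=
  match best with
  | none => some x
  | some b => if b < x then some x else best

theorem foldl_maxStep_some : ∀ (l : List Int) (b : Int),
    l.foldl maxStep (some b) = some (l.foldl max b) := by
  intro l
  induction l with
  | nil => intro b; rfl
  | cons x xs ih =>
    intro b
    have : maxStep (some b) x = some (max b x) := by
      rcases Int.lt_or_le b x with h | h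
      · simp [maxStep, h, max_eq_right h.le]
      · simp [maxStep, not_lt.mpr h, max_eq_left h]
    simp only [List.foldl_cons, this, ih]

theorem foldl_maxStep_none (l : List Int) : l.foldl maxStep none = l.max? := by
  cases l with
  | nil => rfl
  | cons x xs =>
    have h1 : maxStep none x = some x := rfl
    simp only [List.foldl_cons, h1, foldl_maxStep_some]
    rfl

theorem selectNext_true_max (lst : List Int) (prev : Option Int) :
    selectNext lst prev true
      = (lst.filter (fun x => match prev with | some p => decide (x < p) | none => true)).max? := by
  rw [← foldl_maxStep_none, selectNext, List.foldl_filter]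
  congr 1
  funext b x
  cases prev with
  | none => simp [selStep, maxStep]
  | some p =>
    by_cases h : x < p
    · have h' : ¬ p ≤ x := by omega
      cases b <;> simp [selStep, h, h'] <;> simp [maxStep]
    · have h' : p ≤ x := by omega
      simp [selStep, h, h']

theorem L_strict {L : List Int} (hL : L.Pairwise (· > ·)) {i j : Nat}
    (hi : i < L.length) (hj : j < L.length) (hij : i < j) : L[j] < L[i] :=
  List.pairwise_iff_getElem.mp hL i j hi hj hij

theorem selectNext_none (lst L : List Int) (hL : L.Pairwise (· > ·))
    (hm : ∀ z, z ∈ L ↔ z ∈ lst) : selectNext lst none true = L[0]? := by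
  rw [selectNext_true_max]
  cases hL0 : L with
  | nil =>
    have : lst = [] := List.eq_nil_iff_forall_not_mem.mpr (fun x hx => by
      have := (hm x).mpr hx; simp [hL0] at this)
    simp [this]
  | cons l0 t =>
    have hmem : l0 ∈ lst := (hm l0).mp (by simp [hL0])
    have hmax : ∀ b ∈ lst, b ≤ l0 := by
      intro b hb
      have hbL : b ∈ L := (hm b).mpr hb
      rw [hL0] at hbL
      rcases List.mem_cons.mp hbL with rfl | hbt
      · exact le_refl _
      · rw [hL0] at hL
        exact le_of_lt ((List.pairwise_cons.mp hL).1 b hbt)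
    rw [List.filter_true]
    exact List.max?_eq_some_iff.mpr ⟨hmem, hmax⟩

theorem selectNext_some (lst L : List Int) (hL : L.Pairwise (· > ·))
    (hm : ∀ z, z ∈ L ↔ z ∈ lst) (i : Nat) (hi : i < L.length) :
    selectNext lst (some L[i]) true = L[i+1]? := by
  rw [selectNext_true_max]
  have idx : ∀ b ∈ lst, b < L[i] → ∃ j, ∃ (hj : j < L.length), L[j] = b ∧ i < j := by
    intro b hb hblt
    obtain ⟨j, hj, hjb⟩ := List.mem_iff_getElem.mp ((hm b).mpr hb)
    refine ⟨j, hj, hjb, ?_⟩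
    rcases Nat.lt_trichotomy j i with h | rfl | h
    · exact absurd (hjb ▸ L_strict hL hj hi h) (by omega)
    · omega
    · exact h
  by_cases hsucc : i + 1 < L.length
  · rw [List.getElem?_eq_getElem hsucc]
    apply List.max?_eq_some_iff.mpr
    constructor
    · rw [List.mem_filter]
      refine ⟨(hm _).mp (List.getElem_mem hsucc), by simp [L_strict hL hi hsucc (by omega)]⟩
    · intro b hb
      rw [List.mem_filter] at hb
      obtain ⟨j, hj, rfl, hij⟩ := idx b hb.1 (by simpa using hb.2)
      rcases Nat.eq_or_lt_of_le (Nat.succ_le_of_lt hij) with h | h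
      · subst h; exact le_rfl
      · exact le_of_lt (L_strict hL hsucc hj h)
  · rw [List.getElem?_eq_none (by omega)]
    rw [List.max?_eq_none_iff, List.filter_eq_nil_iff]
    intro b hb
    simp only [decide_eq_true_eq]
    intro hblt
    obtain ⟨j, hj, _, hij⟩ := idx b hb hblt
    omega

theorem selLoop_true_shift (lst L : List Int) (hL : L.Pairwise (· > ·))
    (hm : ∀ z, z ∈ L ↔ z ∈ lst) :
    ∀ (k i : Nat) (hi : i < L.length), selLoop lst true k (some L[i]) = L[i+k]? := by
  intro k
  induction k with
  | zero =>
    intro i hi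
    simp [selLoop, List.getElem?_eq_getElem hi]
  | succ k ih =>
    intro i hi
    simp only [selLoop, selectNext_some lst L hL hm i hi]
    by_cases hsucc : i + 1 < L.length
    · rw [List.getElem?_eq_getElem hsucc]
      simp only []
      rw [ih (i+1) hsucc]
      congr 1
      omega
    · rw [List.getElem?_eq_none (by omega), List.getElem?_eq_none (by omega)]

theorem selLoop_true (lst L : List Int) (hL : L.Pairwise (· > ·))
    (hm : ∀ z, z ∈ L ↔ z ∈ lst) :
    ∀ (k : Nat), selLoop lst true (k + 1) none = L[k]? := by
  intro k
  simp only [selLoop, selectNext_none lst L hL hm]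
  cases hL0 : L with
  | nil => simp
  | cons l0 t =>
    have h0 : 0 < L.length := by rw [hL0]; simp
    rw [← hL0, List.getElem?_eq_getElem h0]
    simp only []
    rw [selLoop_true_shift lst L hL hm k 0 h0]
    simp

theorem selStep_neg (prev b : Option Int) (x : Int) :
    Option.map (fun z => -z) (selStep true (Option.map (fun z => -z) prev) b (-x))
      = selStep false prev (Option.map (fun z => -z) b) x := by
  cases prev <;> cases b <;> simp [selStep] <;> split_ifs <;> simp_all <;> omega

theorem foldl_selStep_neg (prev : Option Int) : ∀ (l : List Int) (b : Option Int),
    Option.map (fun z => -z) (l.foldl (fun best x => selStep true (Option.map (fun z => -z) prev) best (-x)) b)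
      = l.foldl (selStep false prev) (Option.map (fun z => -z) b) := by
  intro l
  induction l with
  | nil => intro b; rfl
  | cons x xs ih =>
    intro b
    simp only [List.foldl_cons]
    rw [ih (selStep true (Option.map (fun z => -z) prev) b (-x)), selStep_neg]

theorem selectNext_neg (lst : List Int) (prev : Option Int) :
    selectNext lst prev false
      = Option.map (fun z => -z) (selectNext (lst.map (fun z => -z)) (Option.map (fun z => -z) prev) true) := by
  simp only [selectNext, List.foldl_map]
  rw [foldl_selStep_neg prev lst none]
  rfl

theorem selLoop_neg (lst : List Int) : ∀ (k : Nat) (prev : Option Int),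
    selLoop lst false k prev
      = Option.map (fun z => -z) (selLoop (lst.map (fun z => -z)) true k (Option.map (fun z => -z) prev)) := by
  intro k
  induction k with
  | zero => intro prev; cases prev <;> simp [selLoop]
  | succ k ih =>
    intro prev
    simp only [selLoop]
    rw [selectNext_neg lst prev]
    cases h : selectNext (lst.map (fun z => -z)) (Option.map (fun z => -z) prev) true with
    | none => simp
    | some b =>
      simp only [Option.map_some]
      rw [ih (some (-b))]
      simp

theorem selLoop_false (lst L : List Int) (hL : L.Pairwise (· > ·))
    (hm : ∀ z, z ∈ L ↔ z ∈ lst) :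
    ∀ (k : Nat), selLoop lst false (k + 1) none = L.reverse[k]? := by
  intro k
  have hpw : (L.reverse.map (fun z => -z)).Pairwise (· > ·) := by
    rw [List.pairwise_map, List.pairwise_reverse]
    exact hL.imp (fun h => by omega)
  have hmem : ∀ z, z ∈ L.reverse.map (fun z => -z) ↔ z ∈ lst.map (fun z => -z) := by
    intro z
    simp only [List.mem_map, List.mem_reverse]
    constructor
    · rintro ⟨a, ha, rfl⟩
      exact ⟨a, (hm a).mp ha, rfl⟩
    · rintro ⟨a, ha, rfl⟩
      exact ⟨a, (hm a).mpr ha, rfl⟩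
  have := selLoop_true (lst.map (fun z => -z)) (L.reverse.map (fun z => -z)) hpw hmem k
  rw [selLoop_neg lst (k+1) none]
  simp only [Option.map_none] at this ⊢
  rw [this, List.getElem?_map]
  cases L.reverse[k]? <;> simp

theorem filter_enum_aux (o : List Int) : ∀ (rest pre : List Int) (p : Int),
    o = pre ++ rest → pre.getLast? = some p →
    (((PySem.List.enumerate rest (pre.length : Int)).filter
      (fun ix => ix.1 == 0 || !(PySem.List.pyGet? o (ix.1 - 1) == some ix.2))).map (fun ix => ix.2))
    = ddAux p rest := by
  intro rest
  induction rest with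
  | nil => intro pre p _ _; simp [PySem.List.enumerate_nil, ddAux]
  | cons y ys ih =>
    intro pre p ho hp
    obtain ⟨pre', rfl⟩ : ∃ pre', pre = pre' ++ [p] := by
      rcases List.getLast?_eq_some_iff.mp hp with ⟨pre', h⟩
      exact ⟨pre', h⟩
    have hget : PySem.List.pyGet? o (((pre' ++ [p]).length : Int) - 1) = some p := by
      rw [ho]
      have h1 : ((pre' ++ [p]).length : Int) - 1 = (pre'.length : Int) := by simp
      rw [h1]
      simp only [List.append_assoc, List.singleton_append]
      exact PySem.List.pyGet?_append_length pre' (y :: ys) p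
    have hne0 : (((pre' ++ [p]).length : Int) == 0) = false := by
      simp [List.length_append]
      omega
    have hrec := ih ((pre' ++ [p]) ++ [y]) y (by rw [ho]; simp) (by simp)
    have hlen2 : ((((pre' ++ [p]) ++ [y]).length : Nat) : Int) = ((pre' ++ [p]).length : Int) + 1 := by
      simp
      omega
    rw [hlen2] at hrec
    rw [PySem.List.enumerate_cons, List.filter_cons]
    simp only [hget, hne0, Bool.false_or]
    by_cases hyp : y = p
    · subst hyp
      rw [if_neg (by simp)]
      rw [hrec]
      simp [ddAux]
    · rw [if_pos (by simp; omega)]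
      simp only [List.map_cons]
      rw [hrec]
      simp [ddAux, hyp]

theorem filter_enum_dd (o : List Int) :
    (((PySem.List.enumerate o).filter
      (fun ix => ix.1 == 0 || !(PySem.List.pyGet? o (ix.1 - 1) == some ix.2))).map (fun ix => ix.2))
    = dd o := by
  cases o with
  | nil => simp [PySem.List.enumerate_nil, dd]
  | cons x xs =>
    rw [show PySem.List.enumerate (x :: xs) = PySem.List.enumerate (x :: xs) 0 from rfl,
      PySem.List.enumerate_cons, List.filter_cons]
    rw [if_pos (by simp)]
    simp only [List.map_cons]
    have haux := filter_enum_aux (x :: xs) xs [x] x rfl rfl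
    norm_num at haux
    norm_num [haux, dd]

theorem nth_ordered_eq_alt (lst : List Int) (n : Int) (use_max : Bool) (hpre : 0 ≤ n) :
    nth_ordered lst n use_max = nth_ordered_alt lst n use_max := by
  unfold nth_ordered nth_ordered_alt
  simp only [filter_enum_dd]
  set o := PySem.List.sorted lst (fun x => x) true with ho
  set L := dd o with hLdef
  have hopw : o.Pairwise (· ≥ ·) := PySem.List.sorted_pairwise_rev lst (fun x => x)
  have hLpw : L.Pairwise (· > ·) := dd_pairwise hopw
  have hmemL : ∀ z, z ∈ L ↔ z ∈ lst := fun z =>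
    (dd_mem hopw z).trans (PySem.List.mem_sorted lst (fun x => x) true z)
  have hk : (n + 1).toNat = n.toNat + 1 := by omega
  cases use_max with
  | true =>
    rw [hk, selLoop_true lst L hLpw hmemL n.toNat]
    by_cases hlen : (L.length : Int) > n
    · rw [if_pos hlen, if_pos rfl, PySem.List.pyGet?_of_nonneg L hpre]
    · rw [if_neg hlen, List.getElem?_eq_none (by omega)]
  | false =>
    rw [hk, selLoop_false lst L hLpw hmemL n.toNat]
    by_cases hlen : (L.length : Int) > n
    · rw [if_pos hlen, if_neg (by simp)]
      have h1 : (-1 - n) = -(((n.toNat + 1 : Nat) : Int)) := by push_cast; omega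
      rw [h1, PySem.List.pyGet?_neg_natCast L (n.toNat + 1) (by omega) (by omega)]
      rw [List.getElem?_reverse (by omega)]
      congr 1
      omega
    · rw [if_neg hlen, List.getElem?_eq_none (by simp; omega)]

-- ===== VERDICT (by name: the statement is the Claim_ definition above) =====
theorem nth_ordered_spec : Claim_equal_nth_ordered := by
  intro lst n use_max _ hpre
  exact nth_ordered_eq_alt lst n use_max hpre
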